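-- pv_equiv track=rewrite | github.com/ParallelUniverseProgrammer/2048_bot_latest | scripts/network_troubleshooter.py | _find_best_ip
-- ===== SOURCE A (Python) =====
-- from typing import List, Dict, Optional, Tuple
--
-- def _find_best_ip(interfaces: List[Tuple[str, str]]) -> Optional[str]:
--     """Find the best IP address for LAN access"""
--     if not interfaces:
--         return None
--
--     ips = [ip for _, ip in interfaces]
--
--     # Prefer 192.168.x.x for home networks
--     for interface, ip in interfaces:
--         if ip.startswith('192.168.'):
--             return ip
--
--     # Then prefer 10.x.x.x
--     for interface, ip in interfaces:
--         if ip.startswith('10.'):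
--             return ip
--
--     # Finally accept 172.x.x.x
--     for interface, ip in interfaces:
--         if ip.startswith('172.'):
--             return ip
--
--     # Return first available
--     return interfaces[0][1] if interfaces else None
-- ===== SOURCE B (Python) =====
-- def _find_best_ip(interfaces):
--     if not interfaces:
--         return None
--     first = interfaces[0][1]
--     best192 = best10 = best172 = None
--     for _, ip in interfaces:
--         if best192 is None and ip.startswith('192.168.'):
--             best192 = ip
--         if best10 is None and ip.startswith('10.'):
--             best10 = ip
--         if best172 is None and ip.startswith('172.'):
--             best172 = ip
--     if best192 is not None:
--         return best192
--     if best10 is not None: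
--         return best10
--     if best172 is not None:
--         return best172
--     return first
-- ===== Notes on version B (the rewrite author's own statement) =====
-- stated objective: simpler
-- what changed: Three separate early-return scans (plus an unused list comprehension) are replaced by one single pass that records the first match of each priority tier and picks the best afterward.
import Mathlib
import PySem

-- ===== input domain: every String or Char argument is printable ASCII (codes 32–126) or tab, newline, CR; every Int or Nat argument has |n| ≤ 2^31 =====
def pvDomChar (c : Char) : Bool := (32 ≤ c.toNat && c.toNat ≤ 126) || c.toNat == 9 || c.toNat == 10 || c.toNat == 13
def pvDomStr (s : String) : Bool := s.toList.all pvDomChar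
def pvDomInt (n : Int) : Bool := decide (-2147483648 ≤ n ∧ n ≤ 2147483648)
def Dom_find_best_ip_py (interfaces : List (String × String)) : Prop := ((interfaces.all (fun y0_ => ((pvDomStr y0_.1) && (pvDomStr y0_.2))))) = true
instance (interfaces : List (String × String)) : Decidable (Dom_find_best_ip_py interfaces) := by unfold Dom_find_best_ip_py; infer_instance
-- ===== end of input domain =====

-- B replaces A's three early-return scans (and unused `ips` comprehension) with one
-- single pass recording the first match per priority tier; objective: simpler.

-- ===== PORT A =====
-- one of A's `for interface, ip in interfaces: if ip.startswith(p): return ip` loops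
def pvScanA (p : String) : List (String × String) → Option String
  | [] => none
  | (_, ip) :: rest => if PySem.Str.startswith ip p then some ip else pvScanA p rest

def find_best_ip_py (interfaces : List (String × String)) : Option String :=
  if interfaces = [] then none
  else
    let _ips := interfaces.map (fun x => x.2)   -- A's unused `ips` comprehension
    match pvScanA "192.168." interfaces with
    | some ip => some ip
    | none =>
      match pvScanA "10." interfaces with
      | some ip => some ip
      | none =>
        match pvScanA "172." interfaces with
        | some ip => some ip
        | none => if interfaces ≠ [] then (interfaces.head?.map (fun x => x.2)) else none

-- ===== PORT B =====
-- Source B's single for-loop: three first-match-only accumulators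
def pvLoopB (a b c : Option String) : List (String × String) → Option String × Option String × Option String
  | [] => (a, b, c)
  | (_, ip) :: rest =>
    let a := if a = none ∧ PySem.Str.startswith ip "192.168." then some ip else a
    let b := if b = none ∧ PySem.Str.startswith ip "10." then some ip else b
    let c := if c = none ∧ PySem.Str.startswith ip "172." then some ip else c
    pvLoopB a b c rest

def find_best_ip_py_alt (interfaces : List (String × String)) : Option String :=
  match interfaces with
  | [] => none
  | x :: _ =>
    let first := x.2
    match pvLoopB none none none interfaces with
    | (some v, _, _) => some v
    | (none, some v, _) => some v
    | (none, none, some v) => some v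
    | (none, none, none) => some first

-- ===== PRECONDITION & SPEC =====
def Spec_find_best_ip_py (interfaces : List (String × String)) (out : Option String) : Prop := out = find_best_ip_py_alt interfaces
instance (interfaces : List (String × String)) (out : Option String) : Decidable (Spec_find_best_ip_py interfaces out) := by unfold Spec_find_best_ip_py; infer_instance

-- ===== CLAIM (what is proved, stated in full; the proofs are below) =====
def Claim_equal_find_best_ip_py : Prop := ∀ (interfaces : List (String × String)), Dom_find_best_ip_py interfaces → Spec_find_best_ip_py interfaces (find_best_ip_py interfaces)

-- ===== LEMMAS AND PROOFS =====
def pvOr (a x : Option String) : Option String :=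
  match a with
  | some v => some v
  | none => x

theorem pvOr_none (x : Option String) : pvOr none x = x := rfl

theorem pvOr_some (v : String) (x : Option String) : pvOr (some v) x = some v := rfl

theorem pvOr_if (P : Prop) [Decidable P] (ip : String) (x : Option String) :
    pvOr (if P then some ip else none) x = if P then some ip else x := by
  by_cases h : P <;> simp [pvOr, h]

theorem pvLoopB_eq (l : List (String × String)) : ∀ a b c,
    pvLoopB a b c l =
      (pvOr a (pvScanA "192.168." l), pvOr b (pvScanA "10." l), pvOr c (pvScanA "172." l)) := by
  induction l with
  | nil => intro a b c; cases a <;> cases b <;> cases c <;> simp [pvLoopB, pvScanA, pvOr]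
  | cons x rest ih =>
    intro a b c
    obtain ⟨i, ip⟩ := x
    simp only [pvLoopB, pvScanA, ih]
    cases a <;> cases b <;> cases c <;>
      simp [pvOr_some, pvOr_none, pvOr_if]

-- ===== VERDICT (by name: the statement is the Claim_ definition above) =====
theorem find_best_ip_py_spec : Claim_equal_find_best_ip_py := by
  intro interfaces _
  unfold Spec_find_best_ip_py find_best_ip_py find_best_ip_py_alt
  cases interfaces with
  | nil => simp
  | cons x rest =>
    simp only [pvLoopB_eq, pvOr, reduceCtorEq, ite_false]
    cases h1 : pvScanA "192.168." (x :: rest) <;>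
    cases h2 : pvScanA "10." (x :: rest) <;>
    cases h3 : pvScanA "172." (x :: rest) <;>
    simp [List.head?]
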